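-- pv_equiv track=rewrite | github.com/HBinhCT/Q-project | hackerrank/Algorithms/Permutation game/solution.py | permutationGame
-- ===== SOURCE A (Python) =====
-- def permutationGame(arr):
--     #
--     # Write your code here.
--     #
--     from functools import lru_cache
--
--     def renumber(array):
--         sorted_array = sorted(array)
--         return [sorted_array.index(x) + 1 for x in array]
--
--     @lru_cache(maxsize=None)
--     def _permutation_game(nums):
--         if nums == tuple(sorted(nums)):
--             return 0
--         else:
--             ans = set()
--             for x in nums:
--                 temp = list(nums)
--                 temp.remove(x)
--                 temp = renumber(temp)
--                 ans.add(_permutation_game(tuple(temp)))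
--             res = 0
--             while res in ans:
--                 res += 1
--             return res
--
--     return 'Alice' if _permutation_game(tuple(arr)) else 'Bob'
-- ===== SOURCE B (Python) =====
-- def permutationGame(arr):
--     from functools import lru_cache
--
--     def renumber(array):
--         sorted_array = sorted(array)
--         return [sorted_array.index(x) + 1 for x in array]
--
--     @lru_cache(maxsize=None)
--     def win(nums):
--         # a position is LOSING iff it is sorted, or every move leads to a WINNING one
--         if nums == tuple(sorted(nums)):
--             return False
--         def child(x):
--             rest = list(nums)
--             rest.remove(x)
--             return tuple(renumber(rest))
--         return any(not win(child(x)) for x in nums)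
--
--     return 'Alice' if win(tuple(arr)) else 'Bob'
-- ===== Notes on version B (the rewrite author's own statement) =====
-- stated objective: simpler
-- what changed: Replaces the Grundy-number computation (collect child nimbers in a set, then a mex while-loop) by a direct memoized boolean win/lose recursion with a short-circuiting any() over the same child moves; by Sprague-Grundy, a position has nonzero Grundy value iff some move reaches a Grundy-0 (losing) position.
import Mathlib
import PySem

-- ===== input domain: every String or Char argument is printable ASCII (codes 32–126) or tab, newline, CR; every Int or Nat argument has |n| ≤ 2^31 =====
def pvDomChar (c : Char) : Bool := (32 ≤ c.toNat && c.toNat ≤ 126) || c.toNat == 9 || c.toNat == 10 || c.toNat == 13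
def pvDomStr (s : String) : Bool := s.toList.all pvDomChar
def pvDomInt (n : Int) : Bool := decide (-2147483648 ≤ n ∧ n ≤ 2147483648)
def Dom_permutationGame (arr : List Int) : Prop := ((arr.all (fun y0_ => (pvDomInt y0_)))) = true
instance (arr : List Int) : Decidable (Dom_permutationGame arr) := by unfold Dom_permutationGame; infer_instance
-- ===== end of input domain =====

-- B is a memoized boolean win/lose recursion over the same moves instead of A's Grundy set+mex computation (objective: simpler).

-- ===== PORT A =====
-- `renumber` helper: identical code appears in both Pythons, ported once and shared.
-- `sorted_array.index(x)` always succeeds (x ∈ sorted array); getD 0 is an unreachable default.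
def pgRenumber (array : List Int) : List Int :=
  let sorted_array := PySem.List.sorted array (fun x => x) false
  array.map (fun x => (((PySem.List.index? sorted_array x).getD 0 : Nat) : Int) + 1)

-- the `while res in ans: res += 1` loop; fuel ans.length+1 suffices (ans is duplicate-free)
def pgMexLoop : Nat → List Nat → Nat → Nat
  | 0, _, res => res
  | f + 1, ans, res => if res ∈ ans then pgMexLoop f ans (res + 1) else res

-- `_permutation_game` with its lru_cache as a threaded memo dict keyed on the position;
-- fuel = list length + 1 (each child is one element shorter; fuel 0 unreachable).
-- `temp.remove(x)` always succeeds (x ∈ nums); getD nums is an unreachable default.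
def pgGrundyM : Nat → List Int → PySem.Dict (List Int) Nat → Nat × PySem.Dict (List Int) Nat
  | 0, _, memo => (0, memo)
  | f + 1, nums, memo =>
    match PySem.Dict.get? memo nums with
    | some v => (v, memo)
    | none =>
      if nums = PySem.List.sorted nums (fun x => x) false then
        (0, PySem.Dict.insert memo nums 0)
      else
        let p := nums.foldl
          (fun (p : PySem.Set Nat × PySem.Dict (List Int) Nat) x =>
            let q := pgGrundyM f (pgRenumber ((PySem.List.remove? nums x).getD nums)) p.2
            (PySem.Set.add p.1 q.1, q.2))
          (PySem.Set.empty, memo)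
        let res := pgMexLoop (p.1.length + 1) p.1 0
        (res, PySem.Dict.insert p.2 nums res)

def permutationGame (arr : List Int) : String :=
  if (pgGrundyM (arr.length + 1) arr PySem.Dict.empty).1 ≠ 0 then "Alice" else "Bob"

-- ===== PORT B =====
-- `win` with its lru_cache as a threaded memo dict: sorted → losing; otherwise winning iff
-- some move reaches a losing position (pgAnyM is Source B's short-circuiting any() over the moves).
mutual
def pgWinM : Nat → List Int → PySem.Dict (List Int) Bool → Bool × PySem.Dict (List Int) Bool
  | 0, _, memo => (false, memo)
  | f + 1, nums, memo =>
    match PySem.Dict.get? memo nums with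
    | some v => (v, memo)
    | none =>
      if nums = PySem.List.sorted nums (fun x => x) false then
        (false, PySem.Dict.insert memo nums false)
      else
        let r := pgAnyM f nums nums memo
        (r.1, PySem.Dict.insert r.2 nums r.1)
termination_by f _ _ => (f, 0)

def pgAnyM : Nat → List Int → List Int → PySem.Dict (List Int) Bool → Bool × PySem.Dict (List Int) Bool
  | _, _, [], memo => (false, memo)
  | f, nums, x :: rest, memo =>
    let q := pgWinM f (pgRenumber ((PySem.List.remove? nums x).getD nums)) memo
    if !q.1 then (true, q.2) else pgAnyM f nums rest q.2
termination_by f _ rest _ => (f, rest.length + 1)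
end

def permutationGame_alt (arr : List Int) : String :=
  if (pgWinM (arr.length + 1) arr PySem.Dict.empty).1 then "Alice" else "Bob"

-- ===== PRECONDITION & SPEC =====
def Spec_permutationGame (arr : List Int) (out : String) : Prop := out = permutationGame_alt arr
instance (arr : List Int) (out : String) : Decidable (Spec_permutationGame arr out) := by unfold Spec_permutationGame; infer_instance

-- ===== CLAIM (what is proved, stated in full; the proofs are below) =====
def Claim_equal_permutationGame : Prop := ∀ (arr : List Int), Dom_permutationGame arr → Spec_permutationGame arr (permutationGame arr)

-- ===== LEMMAS AND PROOFS =====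

-- pure (memo-free) reference models of the two recursions, used only in the proofs
def pgGrundy : Nat → List Int → Nat
  | 0, _ => 0
  | f + 1, nums =>
    if nums = PySem.List.sorted nums (fun x => x) false then 0
    else
      let ans : PySem.Set Nat := nums.foldl
        (fun s x => PySem.Set.add s (pgGrundy f (pgRenumber ((PySem.List.remove? nums x).getD nums))))
        PySem.Set.empty
      pgMexLoop (ans.length + 1) ans 0

def pgWin : Nat → List Int → Bool
  | 0, _ => false
  | f + 1, nums =>
    if nums = PySem.List.sorted nums (fun x => x) false then false
    else nums.any (fun x => !(pgWin f (pgRenumber ((PySem.List.remove? nums x).getD nums))))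

theorem pgChild_len (nums : List Int) (x : Int) (hx : x ∈ nums) :
    (pgRenumber ((PySem.List.remove? nums x).getD nums)).length + 1 = nums.length := by
  have h0 : 0 < nums.length := List.length_pos_of_mem hx
  have h1 := List.length_erase_of_mem hx
  simp [pgRenumber, PySem.List.remove?_eq_some_erase nums x hx]
  omega

theorem pgMexLoop_ge (f : Nat) (ans : List Nat) (res : Nat) : res ≤ pgMexLoop f ans res := by
  induction f generalizing res with
  | zero => simp [pgMexLoop]
  | succ f ih =>
    simp only [pgMexLoop]
    split
    · exact le_trans (Nat.le_succ res) (ih (res + 1))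
    · exact le_refl res

theorem pgMexLoop_zero_iff (n : Nat) (ans : List Nat) :
    pgMexLoop (n + 1) ans 0 ≠ 0 ↔ 0 ∈ ans := by
  simp only [pgMexLoop]
  split
  · rename_i h
    constructor
    · intro _; exact h
    · intro _
      have := pgMexLoop_ge n ans (0 + 1)
      omega
  · rename_i h
    simp [h]

-- the key bridge: B's boolean equals "A's Grundy value is nonzero", at every fuel
theorem pgWin_eq_grundy (f : Nat) (nums : List Int) :
    pgWin f nums = decide (pgGrundy f nums ≠ 0) := by
  induction f generalizing nums with
  | zero => simp [pgWin, pgGrundy]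
  | succ f ih =>
    simp only [pgWin, pgGrundy]
    split
    · simp
    · rw [Bool.eq_iff_iff]
      simp only [List.any_eq_true, ih, Bool.not_eq_eq_eq_not, Bool.not_true,
        decide_eq_false_iff_not, not_not, decide_eq_true_eq]
      rw [pgMexLoop_zero_iff, PySem.Set.mem_foldl_add]
      simp [PySem.Set.empty, eq_comm]

-- memo-correctness for A: every cached value is the pure Grundy value of its key
def pgInvA (m : PySem.Dict (List Int) Nat) : Prop :=
  ∀ k v, PySem.Dict.get? m k = some v → v = pgGrundy (k.length + 1) k

theorem pgFoldA (f : Nat)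
    (ih : ∀ (nums : List Int) (memo : PySem.Dict (List Int) Nat), nums.length < f → pgInvA memo →
      (pgGrundyM f nums memo).1 = pgGrundy (nums.length + 1) nums ∧ pgInvA (pgGrundyM f nums memo).2)
    (nums : List Int) (hlen : nums.length ≤ f) :
    ∀ (rest : List Int) (s : PySem.Set Nat) (memo : PySem.Dict (List Int) Nat),
      (∀ x ∈ rest, x ∈ nums) → pgInvA memo →
      (rest.foldl
        (fun (p : PySem.Set Nat × PySem.Dict (List Int) Nat) x =>
          let q := pgGrundyM f (pgRenumber ((PySem.List.remove? nums x).getD nums)) p.2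
          (PySem.Set.add p.1 q.1, q.2)) (s, memo)).1
        = rest.foldl
            (fun s x => PySem.Set.add s (pgGrundy nums.length (pgRenumber ((PySem.List.remove? nums x).getD nums)))) s
      ∧ pgInvA (rest.foldl
        (fun (p : PySem.Set Nat × PySem.Dict (List Int) Nat) x =>
          let q := pgGrundyM f (pgRenumber ((PySem.List.remove? nums x).getD nums)) p.2
          (PySem.Set.add p.1 q.1, q.2)) (s, memo)).2 := by
  intro rest
  induction rest with
  | nil => intro s memo _ hinv; exact ⟨rfl, hinv⟩
  | cons x rest ihr =>
    intro s memo hsub hinv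
    have hx : x ∈ nums := hsub x (List.mem_cons_self ..)
    have hcl := pgChild_len nums x hx
    have hchild : (pgRenumber ((PySem.List.remove? nums x).getD nums)).length < f := by omega
    obtain ⟨hv, hinv'⟩ := ih _ memo hchild hinv
    have hval : (pgGrundyM f (pgRenumber ((PySem.List.remove? nums x).getD nums)) memo).1
        = pgGrundy nums.length (pgRenumber ((PySem.List.remove? nums x).getD nums)) := by
      rw [hv, hcl]
    simp only [List.foldl_cons]
    rw [← hval]
    exact ihr _ _ (fun y hy => hsub y (List.mem_cons_of_mem _ hy)) hinv'

theorem pgGrundyM_correct :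
    ∀ (f : Nat) (nums : List Int) (memo : PySem.Dict (List Int) Nat), nums.length < f → pgInvA memo →
      (pgGrundyM f nums memo).1 = pgGrundy (nums.length + 1) nums ∧ pgInvA (pgGrundyM f nums memo).2 := by
  intro f
  induction f with
  | zero => intro nums memo h; exact absurd h (Nat.not_lt_zero _)
  | succ f ih =>
    intro nums memo hlen hinv
    rw [pgGrundyM]
    cases hget : PySem.Dict.get? memo nums with
    | some v =>
      exact ⟨hinv nums v hget, hinv⟩
    | none =>
      by_cases hs : nums = PySem.List.sorted nums (fun x => x) false
      · have hpure : pgGrundy (nums.length + 1) nums = 0 := by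
          simp only [pgGrundy, if_pos hs]
        simp only [if_pos hs]
        refine ⟨by simp [hpure], ?_⟩
        intro k v hk
        rw [PySem.Dict.get?_insert] at hk
        split at hk
        · rename_i hkn; subst hkn
          simp only [Option.some.injEq] at hk
          rw [← hk, hpure]
        · exact hinv k v hk
      · simp only [if_neg hs]
        obtain ⟨h1, h2⟩ := pgFoldA f ih nums (by omega) nums PySem.Set.empty memo (fun x hx => hx) hinv
        have hpure : pgGrundy (nums.length + 1) nums
            = pgMexLoop ((nums.foldl
                (fun s x => PySem.Set.add s (pgGrundy nums.length (pgRenumber ((PySem.List.remove? nums x).getD nums)))) PySem.Set.empty).length + 1)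
              (nums.foldl
                (fun s x => PySem.Set.add s (pgGrundy nums.length (pgRenumber ((PySem.List.remove? nums x).getD nums)))) PySem.Set.empty) 0 := by
          simp only [pgGrundy, if_neg hs]
        constructor
        · simp only [h1, hpure]
        · intro k v hk
          rw [PySem.Dict.get?_insert] at hk
          split at hk
          · rename_i hkn; subst hkn
            simp only [Option.some.injEq] at hk
            rw [← hk, hpure, h1]
          · exact h2 k v hk

-- memo-correctness for B: every cached value is the pure win/lose value of its key
def pgInvB (m : PySem.Dict (List Int) Bool) : Prop :=
  ∀ k v, PySem.Dict.get? m k = some v → v = pgWin (k.length + 1) k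

theorem pgAnyB (f : Nat)
    (ih : ∀ (nums : List Int) (memo : PySem.Dict (List Int) Bool), nums.length < f → pgInvB memo →
      (pgWinM f nums memo).1 = pgWin (nums.length + 1) nums ∧ pgInvB (pgWinM f nums memo).2)
    (nums : List Int) :
    ∀ (rest : List Int) (memo : PySem.Dict (List Int) Bool),
      (∀ x ∈ rest, x ∈ nums) → nums.length ≤ f → pgInvB memo →
      (pgAnyM f nums rest memo).1
        = rest.any (fun x => !(pgWin nums.length (pgRenumber ((PySem.List.remove? nums x).getD nums))))
      ∧ pgInvB (pgAnyM f nums rest memo).2 := by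
  intro rest
  induction rest with
  | nil =>
    intro memo _ _ hinv
    rw [pgAnyM]
    exact ⟨rfl, hinv⟩
  | cons x rest ihr =>
    intro memo hsub hlen hinv
    have hx : x ∈ nums := hsub x (List.mem_cons_self ..)
    have hcl := pgChild_len nums x hx
    have hchild : (pgRenumber ((PySem.List.remove? nums x).getD nums)).length < f := by omega
    obtain ⟨hv, hinv'⟩ := ih _ memo hchild hinv
    have hval : (pgWinM f (pgRenumber ((PySem.List.remove? nums x).getD nums)) memo).1
        = pgWin nums.length (pgRenumber ((PySem.List.remove? nums x).getD nums)) := by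
      rw [hv, hcl]
    rw [pgAnyM]
    cases hw : pgWin nums.length (pgRenumber ((PySem.List.remove? nums x).getD nums)) with
    | true =>
      have hq : (pgWinM f (pgRenumber ((PySem.List.remove? nums x).getD nums)) memo).1 = true := by
        rw [hval, hw]
      simp only [hq, List.any_cons, hw, Bool.not_true, Bool.false_or, Bool.false_eq_true, if_false]
      exact ihr _ (fun y hy => hsub y (List.mem_cons_of_mem _ hy)) hlen hinv'
    | false =>
      have hq : (pgWinM f (pgRenumber ((PySem.List.remove? nums x).getD nums)) memo).1 = false := by
        rw [hval, hw]
      simp [hq, hw, hinv']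

theorem pgWinM_correct :
    ∀ (f : Nat) (nums : List Int) (memo : PySem.Dict (List Int) Bool), nums.length < f → pgInvB memo →
      (pgWinM f nums memo).1 = pgWin (nums.length + 1) nums ∧ pgInvB (pgWinM f nums memo).2 := by
  intro f
  induction f with
  | zero => intro nums memo h; exact absurd h (Nat.not_lt_zero _)
  | succ f ih =>
    intro nums memo hlen hinv
    rw [pgWinM]
    cases hget : PySem.Dict.get? memo nums with
    | some v =>
      exact ⟨hinv nums v hget, hinv⟩
    | none =>
      by_cases hs : nums = PySem.List.sorted nums (fun x => x) false
      · have hpure : pgWin (nums.length + 1) nums = false := by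
          simp only [pgWin, if_pos hs]
        simp only [if_pos hs]
        refine ⟨by simp [hpure], ?_⟩
        intro k v hk
        rw [PySem.Dict.get?_insert] at hk
        split at hk
        · rename_i hkn; subst hkn
          simp only [Option.some.injEq] at hk
          rw [← hk, hpure]
        · exact hinv k v hk
      · simp only [if_neg hs]
        obtain ⟨h1, h2⟩ := pgAnyB f ih nums nums memo (fun x hx => hx) (by omega) hinv
        have hpure : pgWin (nums.length + 1) nums
            = nums.any (fun x => !(pgWin nums.length (pgRenumber ((PySem.List.remove? nums x).getD nums)))) := by
          simp only [pgWin, if_neg hs]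
        constructor
        · simp only [h1, hpure]
        · intro k v hk
          rw [PySem.Dict.get?_insert] at hk
          split at hk
          · rename_i hkn; subst hkn
            simp only [Option.some.injEq] at hk
            rw [← hk, hpure, h1]
          · exact h2 k v hk

theorem pgInvA_empty : pgInvA PySem.Dict.empty := by
  intro k v hk
  simp [PySem.Dict.get?, PySem.Dict.empty] at hk

theorem pgInvB_empty : pgInvB PySem.Dict.empty := by
  intro k v hk
  simp [PySem.Dict.get?, PySem.Dict.empty] at hk

-- ===== VERDICT (by name: the statement is the Claim_ definition above) =====
theorem permutationGame_spec : Claim_equal_permutationGame := by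
  intro arr _
  unfold Spec_permutationGame permutationGame permutationGame_alt
  rw [(pgGrundyM_correct (arr.length + 1) arr PySem.Dict.empty (by omega) pgInvA_empty).1,
      (pgWinM_correct (arr.length + 1) arr PySem.Dict.empty (by omega) pgInvB_empty).1,
      pgWin_eq_grundy]
  by_cases h : pgGrundy (arr.length + 1) arr ≠ 0 <;> simp [h]
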